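-- pv_equiv track=rewrite | github.com/thisishwan2/Algorithm | programmers/Level1/PCCP 모의고사 2회 1번.py | solution
-- ===== SOURCE A (Python) =====
-- def solution(command):
--     sx, sy = 0, 0
--     dir = 0
--     forward = {0: [0, 1], 1: [1, 0], 2: [0, -1], 3: [-1, 0]}
--     backward = {0: [0, -1], 1: [-1, 0], 2: [0, 1], 3: [1, 0]}
--
--     # 방향: 상우하좌
--
--     for i in command:
--         if i == "R":
--             dir = (dir + 1) % 4
--         elif i == "L":
--             if (dir - 1) < 0:
--                 dir = 3
--             else:
--                 dir = dir - 1
--         elif i == "G":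
--             sx = sx + forward[dir][0]
--             sy = sy + forward[dir][1]
--         elif i == "B":
--             sx = sx + backward[dir][0]
--             sy = sy + backward[dir][1]
--     answer = [sx, sy]
--
--     return answer
-- ===== SOURCE B (Python) =====
-- def solution(command):
--     # Process commands right-to-left: keep only the displacement that the
--     # remaining suffix produces in the local frame (facing +y). A turn
--     # rotates that accumulated displacement; no heading state is tracked.
--     x, y = 0, 0
--     for c in reversed(command):
--         if c == "R":
--             x, y = y, -x
--         elif c == "L":
--             x, y = -y, x
--         elif c == "G":
--             y += 1
--         elif c == "B":
--             y -= 1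
--     return [x, y]
-- ===== Notes on version B (the rewrite author's own statement) =====
-- stated objective: alternative
-- what changed: Scans the command string in reverse, accumulating the suffix's displacement in the local frame and rotating that displacement on each turn, so no heading state (direction index or vector) is tracked at all.
import Mathlib
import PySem

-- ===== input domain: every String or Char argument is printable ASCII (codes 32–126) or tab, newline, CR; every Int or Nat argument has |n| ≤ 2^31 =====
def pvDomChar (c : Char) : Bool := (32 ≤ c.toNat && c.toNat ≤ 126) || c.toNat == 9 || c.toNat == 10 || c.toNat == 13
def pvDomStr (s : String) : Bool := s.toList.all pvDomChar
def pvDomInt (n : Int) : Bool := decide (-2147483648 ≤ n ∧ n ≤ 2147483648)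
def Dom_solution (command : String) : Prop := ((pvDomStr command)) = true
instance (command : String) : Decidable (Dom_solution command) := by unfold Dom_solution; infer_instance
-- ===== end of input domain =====

-- B scans the command in reverse, rotating the accumulated suffix displacement on turns, so it keeps no heading state (alternative decomposition; same cost).

-- ===== PORT A =====
def solutionForward : PySem.Dict Int (List Int) :=
  PySem.Dict.ofList [(0, [0, 1]), (1, [1, 0]), (2, [0, -1]), (3, [-1, 0])]
def solutionBackward : PySem.Dict Int (List Int) :=
  PySem.Dict.ofList [(0, [0, -1]), (1, [-1, 0]), (2, [0, 1]), (3, [1, 0])]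

def solutionStepA (st : Int × Int × Int) (i : Char) : Int × Int × Int :=
  let (sx, sy, dir) := st
  if i = 'R' then (sx, sy, PySem.Int.mod (dir + 1) 4)
  else if i = 'L' then
    (sx, sy, if dir - 1 < 0 then 3 else dir - 1)
  else if i = 'G' then
    (sx + PySem.List.pyGetD (solutionForward.getD dir []) 0 0,
     sy + PySem.List.pyGetD (solutionForward.getD dir []) 1 0, dir)
  else if i = 'B' then
    (sx + PySem.List.pyGetD (solutionBackward.getD dir []) 0 0,
     sy + PySem.List.pyGetD (solutionBackward.getD dir []) 1 0, dir)
  else st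

def solution (command : String) : List Int :=
  let s := command.toList.foldl solutionStepA (0, 0, 0)
  [s.1, s.2.1]

-- ===== PORT B =====
-- the reversed-iteration loop of Source B = a foldr over the character list
def solutionStepB (c : Char) (p : Int × Int) : Int × Int :=
  if c = 'R' then (p.2, -p.1)
  else if c = 'L' then (-p.2, p.1)
  else if c = 'G' then (p.1, p.2 + 1)
  else if c = 'B' then (p.1, p.2 - 1)
  else p

def solution_alt (command : String) : List Int :=
  let p := command.toList.foldr solutionStepB (0, 0)
  [p.1, p.2]

-- ===== PRECONDITION & SPEC =====
def Spec_solution (command : String) (out : List Int) : Prop := out = solution_alt command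
instance (command : String) (out : List Int) : Decidable (Spec_solution command out) := by unfold Spec_solution; infer_instance

-- ===== CLAIM (what is proved, stated in full; the proofs are below) =====
def Claim_equal_solution : Prop := ∀ (command : String), Dom_solution command → Spec_solution command (solution command)

-- ===== LEMMAS AND PROOFS =====

-- rotation of a local-frame displacement into the frame of direction index d
def solutionRot (d : Int) (v : Int × Int) : Int × Int :=
  if d = 0 then v else if d = 1 then (v.2, -v.1) else if d = 2 then (-v.1, -v.2) else (-v.2, v.1)

theorem solution_stepA_R (sx sy dir : Int) :
    solutionStepA (sx, sy, dir) 'R' = (sx, sy, PySem.Int.mod (dir + 1) 4) := by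
  simp only [solutionStepA, ite_true, reduceIte]

theorem solution_stepA_other {c : Char} (hR : c ≠ 'R') (hL : c ≠ 'L') (hG : c ≠ 'G')
    (hB : c ≠ 'B') (st : Int × Int × Int) : solutionStepA st c = st := by
  obtain ⟨sx, sy, dir⟩ := st
  simp [solutionStepA, hR, hL, hG, hB]

theorem solution_stepA_L0 (sx sy : Int) :
    solutionStepA (sx, sy, (0 : Int)) 'L' = (sx, sy, 3) := by
  simp [solutionStepA]

theorem solution_stepA_G0 (sx sy : Int) :
    solutionStepA (sx, sy, (0 : Int)) 'G' = (sx + 0, sy + 1, 0) := by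
  simp only [solutionStepA, ite_true, reduceIte]
  rfl

theorem solution_stepA_B0 (sx sy : Int) :
    solutionStepA (sx, sy, (0 : Int)) 'B' = (sx + 0, sy + (-1), 0) := by
  simp only [solutionStepA, ite_true, reduceIte]
  rfl

theorem solution_stepA_L1 (sx sy : Int) :
    solutionStepA (sx, sy, (1 : Int)) 'L' = (sx, sy, 0) := by
  simp [solutionStepA]

theorem solution_stepA_G1 (sx sy : Int) :
    solutionStepA (sx, sy, (1 : Int)) 'G' = (sx + 1, sy + 0, 1) := by
  simp only [solutionStepA, ite_true, reduceIte]
  rfl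

theorem solution_stepA_B1 (sx sy : Int) :
    solutionStepA (sx, sy, (1 : Int)) 'B' = (sx + (-1), sy + 0, 1) := by
  simp only [solutionStepA, ite_true, reduceIte]
  rfl

theorem solution_stepA_L2 (sx sy : Int) :
    solutionStepA (sx, sy, (2 : Int)) 'L' = (sx, sy, 1) := by
  simp [solutionStepA]

theorem solution_stepA_G2 (sx sy : Int) :
    solutionStepA (sx, sy, (2 : Int)) 'G' = (sx + 0, sy + (-1), 2) := by
  simp only [solutionStepA, ite_true, reduceIte]
  rfl

theorem solution_stepA_B2 (sx sy : Int) :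
    solutionStepA (sx, sy, (2 : Int)) 'B' = (sx + 0, sy + 1, 2) := by
  simp only [solutionStepA, ite_true, reduceIte]
  rfl

theorem solution_stepA_L3 (sx sy : Int) :
    solutionStepA (sx, sy, (3 : Int)) 'L' = (sx, sy, 2) := by
  simp [solutionStepA]

theorem solution_stepA_G3 (sx sy : Int) :
    solutionStepA (sx, sy, (3 : Int)) 'G' = (sx + (-1), sy + 0, 3) := by
  simp only [solutionStepA, ite_true, reduceIte]
  rfl

theorem solution_stepA_B3 (sx sy : Int) :
    solutionStepA (sx, sy, (3 : Int)) 'B' = (sx + 1, sy + 0, 3) := by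
  simp only [solutionStepA, ite_true, reduceIte]
  rfl

theorem solution_loop_eq (cs : List Char) (sx sy dir : Int)
    (h : dir = 0 ∨ dir = 1 ∨ dir = 2 ∨ dir = 3) :
    (cs.foldl solutionStepA (sx, sy, dir)).1
      = sx + (solutionRot dir (cs.foldr solutionStepB (0, 0))).1 ∧
    (cs.foldl solutionStepA (sx, sy, dir)).2.1
      = sy + (solutionRot dir (cs.foldr solutionStepB (0, 0))).2 := by
  induction cs generalizing sx sy dir with
  | nil =>
    rcases h with h | h | h | h <;> subst h <;> simp [solutionRot]
  | cons c cs ih =>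
    simp only [List.foldl_cons, List.foldr_cons]
    rcases h with h | h | h | h <;> subst h
    · by_cases hR : c = 'R'
      · subst hR
        obtain ⟨h1, h2⟩ := ih sx sy 1 (by norm_num)
        rw [solution_stepA_R, show PySem.Int.mod ((0 : Int) + 1) 4 = 1 from by decide]
        exact ⟨by rw [h1]; simp [solutionStepB, solutionRot]; try ring, by rw [h2]; simp [solutionStepB, solutionRot]; try ring⟩
      · by_cases hL : c = 'L'
        · subst hL
          obtain ⟨h1, h2⟩ := ih sx sy 3 (by norm_num)
          rw [solution_stepA_L0]
          exact ⟨by rw [h1]; simp [solutionStepB, solutionRot]; try ring, by rw [h2]; simp [solutionStepB, solutionRot]; try ring⟩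
        · by_cases hG : c = 'G'
          · subst hG
            obtain ⟨h1, h2⟩ := ih (sx + 0) (sy + 1) 0 (by norm_num)
            rw [solution_stepA_G0]
            exact ⟨by rw [h1]; simp [solutionStepB, solutionRot]; try ring, by rw [h2]; simp [solutionStepB, solutionRot]; try ring⟩
          · by_cases hB : c = 'B'
            · subst hB
              obtain ⟨h1, h2⟩ := ih (sx + 0) (sy + (-1)) 0 (by norm_num)
              rw [solution_stepA_B0]
              exact ⟨by rw [h1]; simp [solutionStepB, solutionRot]; try ring, by rw [h2]; simp [solutionStepB, solutionRot]; try ring⟩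
            · obtain ⟨h1, h2⟩ := ih sx sy 0 (by norm_num)
              rw [solution_stepA_other hR hL hG hB]
              exact ⟨by rw [h1]; simp [solutionStepB, solutionRot, hR, hL, hG, hB]; try ring, by rw [h2]; simp [solutionStepB, solutionRot, hR, hL, hG, hB]; try ring⟩
    · by_cases hR : c = 'R'
      · subst hR
        obtain ⟨h1, h2⟩ := ih sx sy 2 (by norm_num)
        rw [solution_stepA_R, show PySem.Int.mod ((1 : Int) + 1) 4 = 2 from by decide]
        exact ⟨by rw [h1]; simp [solutionStepB, solutionRot]; try ring, by rw [h2]; simp [solutionStepB, solutionRot]; try ring⟩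
      · by_cases hL : c = 'L'
        · subst hL
          obtain ⟨h1, h2⟩ := ih sx sy 0 (by norm_num)
          rw [solution_stepA_L1]
          exact ⟨by rw [h1]; simp [solutionStepB, solutionRot]; try ring, by rw [h2]; simp [solutionStepB, solutionRot]; try ring⟩
        · by_cases hG : c = 'G'
          · subst hG
            obtain ⟨h1, h2⟩ := ih (sx + 1) (sy + 0) 1 (by norm_num)
            rw [solution_stepA_G1]
            exact ⟨by rw [h1]; simp [solutionStepB, solutionRot]; try ring, by rw [h2]; simp [solutionStepB, solutionRot]; try ring⟩
          · by_cases hB : c = 'B'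
            · subst hB
              obtain ⟨h1, h2⟩ := ih (sx + (-1)) (sy + 0) 1 (by norm_num)
              rw [solution_stepA_B1]
              exact ⟨by rw [h1]; simp [solutionStepB, solutionRot]; try ring, by rw [h2]; simp [solutionStepB, solutionRot]; try ring⟩
            · obtain ⟨h1, h2⟩ := ih sx sy 1 (by norm_num)
              rw [solution_stepA_other hR hL hG hB]
              exact ⟨by rw [h1]; simp [solutionStepB, solutionRot, hR, hL, hG, hB]; try ring, by rw [h2]; simp [solutionStepB, solutionRot, hR, hL, hG, hB]; try ring⟩
    · by_cases hR : c = 'R'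
      · subst hR
        obtain ⟨h1, h2⟩ := ih sx sy 3 (by norm_num)
        rw [solution_stepA_R, show PySem.Int.mod ((2 : Int) + 1) 4 = 3 from by decide]
        exact ⟨by rw [h1]; simp [solutionStepB, solutionRot]; try ring, by rw [h2]; simp [solutionStepB, solutionRot]; try ring⟩
      · by_cases hL : c = 'L'
        · subst hL
          obtain ⟨h1, h2⟩ := ih sx sy 1 (by norm_num)
          rw [solution_stepA_L2]
          exact ⟨by rw [h1]; simp [solutionStepB, solutionRot]; try ring, by rw [h2]; simp [solutionStepB, solutionRot]; try ring⟩
        · by_cases hG : c = 'G'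
          · subst hG
            obtain ⟨h1, h2⟩ := ih (sx + 0) (sy + (-1)) 2 (by norm_num)
            rw [solution_stepA_G2]
            exact ⟨by rw [h1]; simp [solutionStepB, solutionRot]; try ring, by rw [h2]; simp [solutionStepB, solutionRot]; try ring⟩
          · by_cases hB : c = 'B'
            · subst hB
              obtain ⟨h1, h2⟩ := ih (sx + 0) (sy + 1) 2 (by norm_num)
              rw [solution_stepA_B2]
              exact ⟨by rw [h1]; simp [solutionStepB, solutionRot]; try ring, by rw [h2]; simp [solutionStepB, solutionRot]; try ring⟩
            · obtain ⟨h1, h2⟩ := ih sx sy 2 (by norm_num)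
              rw [solution_stepA_other hR hL hG hB]
              exact ⟨by rw [h1]; simp [solutionStepB, solutionRot, hR, hL, hG, hB]; try ring, by rw [h2]; simp [solutionStepB, solutionRot, hR, hL, hG, hB]; try ring⟩
    · by_cases hR : c = 'R'
      · subst hR
        obtain ⟨h1, h2⟩ := ih sx sy 0 (by norm_num)
        rw [solution_stepA_R, show PySem.Int.mod ((3 : Int) + 1) 4 = 0 from by decide]
        exact ⟨by rw [h1]; simp [solutionStepB, solutionRot]; try ring, by rw [h2]; simp [solutionStepB, solutionRot]; try ring⟩
      · by_cases hL : c = 'L'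
        · subst hL
          obtain ⟨h1, h2⟩ := ih sx sy 2 (by norm_num)
          rw [solution_stepA_L3]
          exact ⟨by rw [h1]; simp [solutionStepB, solutionRot]; try ring, by rw [h2]; simp [solutionStepB, solutionRot]; try ring⟩
        · by_cases hG : c = 'G'
          · subst hG
            obtain ⟨h1, h2⟩ := ih (sx + (-1)) (sy + 0) 3 (by norm_num)
            rw [solution_stepA_G3]
            exact ⟨by rw [h1]; simp [solutionStepB, solutionRot]; try ring, by rw [h2]; simp [solutionStepB, solutionRot]; try ring⟩
          · by_cases hB : c = 'B'
            · subst hB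
              obtain ⟨h1, h2⟩ := ih (sx + 1) (sy + 0) 3 (by norm_num)
              rw [solution_stepA_B3]
              exact ⟨by rw [h1]; simp [solutionStepB, solutionRot]; try ring, by rw [h2]; simp [solutionStepB, solutionRot]; try ring⟩
            · obtain ⟨h1, h2⟩ := ih sx sy 3 (by norm_num)
              rw [solution_stepA_other hR hL hG hB]
              exact ⟨by rw [h1]; simp [solutionStepB, solutionRot, hR, hL, hG, hB]; try ring, by rw [h2]; simp [solutionStepB, solutionRot, hR, hL, hG, hB]; try ring⟩

-- ===== VERDICT (by name: the statement is the Claim_ definition above) =====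
theorem solution_spec : Claim_equal_solution := by
  intro command _
  unfold Spec_solution solution solution_alt
  have h := solution_loop_eq command.toList 0 0 0 (by norm_num)
  simp only [solutionRot, if_pos rfl] at h
  simp_all
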